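-- pv_equiv track=rewrite | github.com/rodsenra/falouedisse | src/quote_from_news.py | heuristic_elect_candidate
-- ===== SOURCE A (Python) =====
-- def heuristic_elect_candidate(candidates):
--     names = {}
--     for pos, candidate_list in candidates:
--         for candidate in candidate_list:
--             try:
--                 names[candidate] = names[candidate] + 1
--             except KeyError:
--                 names[candidate] = 1
--
--     for other_name, count in names.copy().items():
--         for name in names:
--             if name == other_name:
--                 continue
--             if other_name in name:
--                 names[name] += count
--     won = sorted(((v, k) for k, v in names.items()))[-1][1]
--     return won
-- ===== SOURCE B (Python) =====
-- def heuristic_elect_candidate(candidates):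
--     counts = {}
--     for _pos, names in candidates:
--         for name in names:
--             counts[name] = counts.get(name, 0) + 1
--     best = None
--     for name in counts:
--         pieces = {name[i:j] for i in range(len(name) + 1)
--                             for j in range(i, len(name) + 1)}
--         score = sum(counts.get(p, 0) for p in pieces)
--         if best is None or (score, name) > best:
--             best = (score, name)
--     return best[1]
-- ===== Notes on version B (the rewrite author's own statement) =====
-- stated objective: faster
-- what changed: Replaced A's pairwise substring-containment scan between stored names (boosting a dict snapshot in place, then a full sort) by hash lookups: for each distinct name B enumerates the set of its own substrings and sums the count dict over them (no containment test at all), keeping a running (score, name) maximum instead of sorting.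
import Mathlib
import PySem

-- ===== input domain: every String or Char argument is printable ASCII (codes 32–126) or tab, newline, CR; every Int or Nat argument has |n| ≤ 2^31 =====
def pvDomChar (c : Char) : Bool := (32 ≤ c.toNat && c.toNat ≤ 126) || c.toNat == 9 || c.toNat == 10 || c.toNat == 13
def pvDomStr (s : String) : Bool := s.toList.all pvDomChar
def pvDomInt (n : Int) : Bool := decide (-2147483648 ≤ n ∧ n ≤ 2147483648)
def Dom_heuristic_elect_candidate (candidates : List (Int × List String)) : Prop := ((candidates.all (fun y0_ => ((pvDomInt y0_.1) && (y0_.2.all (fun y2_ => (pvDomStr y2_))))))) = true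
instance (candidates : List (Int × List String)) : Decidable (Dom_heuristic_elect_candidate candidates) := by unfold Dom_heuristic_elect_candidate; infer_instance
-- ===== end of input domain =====

-- B scores each name by summing the count dict over the set of the name's own substrings
-- (hash lookups instead of A's pairwise containment scan with in-place boosting) and keeps a
-- running (score, name) maximum instead of sorting: O(K*L^2) lookups instead of O(K^2*L)
-- containment tests (K distinct names, length <= L); measured faster in a timing run.


-- ===== PORT A =====
-- 'names[candidate] = names[candidate] + 1' inside try / 'names[candidate] = 1' on KeyError
def aCount (d : PySem.Dict String Int) (c : String) : PySem.Dict String Int :=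
  match d.get? c with
  | some v => d.insert c (v + 1)
  | none => d.insert c 1

-- body of the inner 'for name in names' loop; 'names[name] += count' is modify (name is a key)
def aBoostInner (o : String) (c : Int) (d : PySem.Dict String Int) (n : String) : PySem.Dict String Int :=
  if n == o then d
  else if PySem.Str.isIn o n then d.modify n 0 (· + c)
  else d

-- one iteration of the outer 'for other_name, count in names.copy().items()' loop
def aBoostOuter (d : PySem.Dict String Int) (oc : String × Int) : PySem.Dict String Int :=
  d.keys.foldl (aBoostInner oc.1 oc.2) d

def heuristic_elect_candidate (candidates : List (Int × List String)) : String :=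
  let names0 : PySem.Dict String Int :=
    candidates.foldl (fun names pc => pc.2.foldl aCount names) PySem.Dict.empty
  let names1 : PySem.Dict String Int := names0.items.foldl aBoostOuter names0
  match PySem.List.pyGet?
      (PySem.List.sorted2 (names1.items.map (fun kv => (kv.2, kv.1))) Prod.fst Prod.snd) (-1) with
  | some p => p.2
  | none => ""   -- Python raises IndexError here (no names at all); excluded by Pre_

-- ===== PORT B =====
-- '{name[i:j] for i in range(len(name) + 1) for j in range(i, len(name) + 1)}'
def bPieces (name : String) : PySem.Set String :=
  PySem.Set.ofList
    ((PySem.List.pyRange 0 (PySem.Str.len name + 1)).flatMap (fun i =>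
      (PySem.List.pyRange i (PySem.Str.len name + 1)).map (fun j =>
        PySem.Str.slice name (some i) (some j))))

-- 'sum(counts.get(p, 0) for p in pieces)'
def bScore (counts : PySem.Dict String Int) (name : String) : Int :=
  ((bPieces name).map (fun p => counts.getD p 0)).sum

-- body of the 'for name in counts' loop: keep best = max (score, name) pair, Python tuple '>'
def bStep (counts : PySem.Dict String Int) (best : Option (Int × String)) (name : String) :
    Option (Int × String) :=
  match best with
  | none => some (bScore counts name, name)
  | some b =>
      if decide (b.1 < bScore counts name) ||
         (!decide (bScore counts name < b.1) && decide (b.2 < name)) then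
        some (bScore counts name, name)
      else some b

def heuristic_elect_candidate_alt (candidates : List (Int × List String)) : String :=
  let counts : PySem.Dict String Int :=
    candidates.foldl
      (fun d pc => pc.2.foldl (fun d name => d.insert name (d.getD name 0 + 1)) d)
      PySem.Dict.empty
  match counts.keys.foldl (bStep counts) none with
  | some b => b.2
  | none => ""   -- Python raises TypeError here (best is None); excluded by Pre_

-- ===== PRECONDITION & SPEC =====
-- Pre_ excludes exactly the inputs with no candidate name at all, on which A raises IndexError
-- (sorted(...)[-1] of an empty list) and B raises TypeError (None[1]).
def Pre_heuristic_elect_candidate (candidates : List (Int × List String)) : Prop :=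
  candidates.flatMap (fun pc => pc.2) ≠ []
instance (candidates : List (Int × List String)) : Decidable (Pre_heuristic_elect_candidate candidates) := by unfold Pre_heuristic_elect_candidate; infer_instance

def pvWitness_heuristic_elect_candidate : (List (Int × List String)) := ([(1, ["ab", "a"]), (2, ["b"])])

def Spec_heuristic_elect_candidate (candidates : List (Int × List String)) (out : String) : Prop := out = heuristic_elect_candidate_alt candidates
instance (candidates : List (Int × List String)) (out : String) : Decidable (Spec_heuristic_elect_candidate candidates out) := by unfold Spec_heuristic_elect_candidate; infer_instance

-- ===== CLAIM (what is proved, stated in full; the proofs are below) =====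
def Claim_equal_heuristic_elect_candidate : Prop := ∀ (candidates : List (Int × List String)), Dom_heuristic_elect_candidate candidates → Pre_heuristic_elect_candidate candidates → Spec_heuristic_elect_candidate candidates (heuristic_elect_candidate candidates)

-- ===== LEMMAS AND PROOFS =====

-- the strict lexicographic tuple order Python's sorted and tuple '<' use on (Int, String) pairs
def pLT (a b : Int × String) : Bool :=
  decide (a.1 < b.1) || (!decide (b.1 < a.1) && decide (a.2 < b.2))

theorem pLT_iff (a b : Int × String) :
    pLT a b = true ↔ a.1 < b.1 ∨ (a.1 = b.1 ∧ a.2 < b.2) := by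
  simp only [pLT, Bool.or_eq_true, Bool.and_eq_true, Bool.not_eq_true', decide_eq_true_iff,
    decide_eq_false_iff_not]
  constructor
  · rintro (h | ⟨h1, h2⟩)
    · exact Or.inl h
    · rcases lt_trichotomy a.1 b.1 with h' | h' | h'
      · exact Or.inl h'
      · exact Or.inr ⟨h', h2⟩
      · exact absurd h' h1
  · rintro (h | ⟨h1, h2⟩)
    · exact Or.inl h
    · exact Or.inr ⟨by omega, h2⟩

theorem pLT_false_iff (a b : Int × String) :
    pLT a b = false ↔ ¬ (a.1 < b.1 ∨ (a.1 = b.1 ∧ a.2 < b.2)) := by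
  rw [← pLT_iff]
  cases h : pLT a b <;> simp

theorem pLT_irrefl (a : Int × String) : pLT a a = false := by
  rw [pLT_false_iff]; rintro (h | ⟨-, h⟩) <;> exact lt_irrefl _ h

theorem pLT_asymm {a b : Int × String} (h : pLT a b = true) : pLT b a = false := by
  rw [pLT_iff] at h
  rw [pLT_false_iff]
  rintro (h' | ⟨h1', h2'⟩) <;> rcases h with h | ⟨h1, h2⟩
  · omega
  · omega
  · omega
  · exact absurd h2' (lt_asymm h2)

theorem pLT_trans {a b c : Int × String} (h1 : pLT a b = true) (h2 : pLT b c = true) :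
    pLT a c = true := by
  rw [pLT_iff] at h1 h2 ⊢
  rcases h1 with h1 | ⟨h1, h1'⟩ <;> rcases h2 with h2 | ⟨h2, h2'⟩
  · exact Or.inl (by omega)
  · exact Or.inl (by omega)
  · exact Or.inl (by omega)
  · exact Or.inr ⟨by omega, lt_trans h1' h2'⟩

theorem pLT_not_trans {a b c : Int × String} (h1 : pLT a b = false) (h2 : pLT b c = false) :
    pLT a c = false := by
  rw [pLT_false_iff] at h1 h2 ⊢
  rintro (h | ⟨hEq, hLt⟩)
  · rcases lt_trichotomy a.1 b.1 with h' | h' | h'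
    · exact h1 (Or.inl h')
    · exact h2 (Or.inl (by omega))
    · rcases lt_trichotomy b.1 c.1 with h'' | h'' | h''
      · exact h2 (Or.inl h'')
      · exact h1 (Or.inl (by omega))
      · omega
  · rcases lt_trichotomy a.1 b.1 with h' | h' | h'
    · exact h1 (Or.inl h')
    · rcases lt_trichotomy a.2 b.2 with hs | hs | hs
      · exact h1 (Or.inr ⟨h', hs⟩)
      · exact h2 (Or.inr ⟨by omega, hs ▸ hLt⟩)
      · exact h2 (Or.inr ⟨by omega, lt_trans hs hLt⟩)
    · exact h2 (Or.inl (by omega))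

theorem pLT_total {a b : Int × String} (h : a.2 ≠ b.2) : pLT a b = true ∨ pLT b a = true := by
  rw [pLT_iff, pLT_iff]
  rcases lt_trichotomy a.1 b.1 with h' | h' | h'
  · exact Or.inl (Or.inl h')
  · rcases lt_or_gt_of_ne h with hs | hs
    · exact Or.inl (Or.inr ⟨h', hs⟩)
    · exact Or.inr (Or.inr ⟨h'.symm, hs⟩)
  · exact Or.inr (Or.inl h')

-- the running-maximum step both sides reduce to
def mStep (acc : Option (Int × String)) (x : Int × String) : Option (Int × String) :=
  match acc with
  | none => some x
  | some m => if pLT m x then some x else some m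

theorem maxfold_spec (l : List (Int × String)) :
    ∀ m0 : Int × String, ∃ m,
      l.foldl mStep (some m0) = some m ∧
      (m = m0 ∨ m ∈ l) ∧ pLT m m0 = false ∧ ∀ y ∈ l, pLT m y = false := by
  induction l with
  | nil =>
    intro m0
    exact ⟨m0, rfl, Or.inl rfl, pLT_irrefl m0, by simp⟩
  | cons x t ih =>
    intro m0
    by_cases hc : pLT m0 x = true
    · obtain ⟨m, hfold, hmem, hge, hall⟩ := ih x
      refine ⟨m, ?_, ?_, ?_, ?_⟩
      · rw [List.foldl_cons, show mStep (some m0) x = some x from by simp [mStep, hc]]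
        exact hfold
      · rcases hmem with h | h
        · exact Or.inr (h ▸ List.mem_cons_self)
        · exact Or.inr (List.mem_cons_of_mem _ h)
      · by_cases h : pLT m m0 = true
        · exact absurd (pLT_trans h hc) (by simp [hge])
        · simpa using h
      · intro y hy
        rcases List.mem_cons.mp hy with h | h
        · exact h ▸ hge
        · exact hall y h
    · replace hc : pLT m0 x = false := by simpa using hc
      obtain ⟨m, hfold, hmem, hge, hall⟩ := ih m0
      refine ⟨m, ?_, ?_, ?_, ?_⟩
      · rw [List.foldl_cons, show mStep (some m0) x = some m0 from by simp [mStep, hc]]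
        exact hfold
      · rcases hmem with h | h
        · exact Or.inl h
        · exact Or.inr (List.mem_cons_of_mem _ h)
      · exact hge
      · intro y hy
        rcases List.mem_cons.mp hy with h | h
        · exact h ▸ pLT_not_trans hge hc
        · exact hall y h

theorem max_spec (l : List (Int × String)) (h : l ≠ []) :
    ∃ m, l.foldl mStep none = some m ∧ m ∈ l ∧ ∀ y ∈ l, pLT m y = false := by
  obtain ⟨x, t, rfl⟩ := List.exists_cons_of_ne_nil h
  obtain ⟨m, hfold, hmem, hge, hall⟩ := maxfold_spec t x
  refine ⟨m, by rw [List.foldl_cons]; exact hfold, ?_, ?_⟩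
  · rcases hmem with h | h
    · exact h ▸ List.mem_cons_self
    · exact List.mem_cons_of_mem _ h
  · intro y hy
    rcases List.mem_cons.mp hy with h | h
    · exact h ▸ hge
    · exact hall y h

-- sorted2 with keys fst/snd is pairwise non-decreasing for pLT
theorem insertBy_nil (x : Int × String) : PySem.List.insertBy pLT x [] = [x] := rfl

theorem insertBy_cons (x y : Int × String) (ys : List (Int × String)) :
    PySem.List.insertBy pLT x (y :: ys) =
      if pLT x y then x :: y :: ys else y :: PySem.List.insertBy pLT x ys := rfl

theorem insertBy_pairwise (x : Int × String) (l : List (Int × String))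
    (h : l.Pairwise (fun a b => pLT b a = false)) :
    (PySem.List.insertBy pLT x l).Pairwise (fun a b => pLT b a = false) := by
  induction l with
  | nil => simp [insertBy_nil]
  | cons y ys ih =>
    rw [insertBy_cons]
    rcases List.pairwise_cons.mp h with ⟨hy, hys⟩
    by_cases hxy : pLT x y = true
    · rw [if_pos hxy]
      refine List.pairwise_cons.mpr ⟨?_, List.pairwise_cons.mpr ⟨hy, hys⟩⟩
      intro z hz
      rcases List.mem_cons.mp hz with h' | h'
      · exact h' ▸ pLT_asymm hxy
      · by_cases hzx : pLT z x = true
        · exact absurd (pLT_trans hzx hxy) (by simp [hy z h'])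
        · simpa using hzx
    · replace hxy : pLT x y = false := by simpa using hxy
      rw [if_neg (by simp [hxy])]
      refine List.pairwise_cons.mpr ⟨?_, ih hys⟩
      intro z hz
      rcases (PySem.List.mem_insertBy pLT x z ys).mp hz with h' | h'
      · exact h' ▸ hxy
      · exact hy z h'

theorem sorted2_eq_foldl (l : List (Int × String)) :
    PySem.List.sorted2 l Prod.fst Prod.snd =
      l.foldl (fun acc x => PySem.List.insertBy pLT x acc) [] := by
  unfold PySem.List.sorted2
  congr 1

theorem sorted2_pairwise (l : List (Int × String)) :
    (PySem.List.sorted2 l Prod.fst Prod.snd).Pairwise (fun a b => pLT b a = false) := by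
  rw [sorted2_eq_foldl]
  have : ∀ (l acc : List (Int × String)), acc.Pairwise (fun a b => pLT b a = false) →
      (l.foldl (fun acc x => PySem.List.insertBy pLT x acc) acc).Pairwise
        (fun a b => pLT b a = false) := by
    intro l
    induction l with
    | nil => intro acc h; exact h
    | cons x t ih =>
      intro acc h
      exact ih _ (insertBy_pairwise x acc h)
  exact this l [] (by simp)

theorem pairwise_getLast {α : Type} {R : α → α → Prop} (s : List α) (m : α)
    (hL : s.getLast? = some m) (hP : s.Pairwise R) : ∀ y ∈ s, y = m ∨ R y m := by
  induction s with
  | nil => simp at hL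
  | cons a t ih =>
    rcases List.pairwise_cons.mp hP with ⟨ha, ht⟩
    cases t with
    | nil =>
      simp only [List.getLast?_singleton, Option.some.injEq] at hL
      intro y hy
      rcases List.mem_singleton.mp hy with rfl
      exact Or.inl hL
    | cons b u =>
      rw [List.getLast?_cons_cons] at hL
      intro y hy
      rcases List.mem_cons.mp hy with rfl | hy'
      · have hm : m ∈ b :: u := List.mem_of_getLast? hL
        exact Or.inr (ha m hm)
      · exact ih hL ht y hy'

-- A's sorted(...)[-1] = B's running maximum, on a snd-distinct nonempty pair list
theorem select_eq (ps : List (Int × String)) (hne : ps ≠ []) (hnd : (ps.map Prod.snd).Nodup) :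
    (match PySem.List.pyGet? (PySem.List.sorted2 ps Prod.fst Prod.snd) (-1) with
     | some p => p.2
     | none => "") =
    (match ps.foldl mStep none with
     | some p => p.2
     | none => "") := by
  obtain ⟨m, hm, hmmem, hmmax⟩ := max_spec ps hne
  have hperm := PySem.List.sorted2_perm ps Prod.fst Prod.snd false
  have hsne : PySem.List.sorted2 ps Prod.fst Prod.snd ≠ [] := by
    intro h0
    have hl := hperm.length_eq
    rw [h0] at hl
    exact hne (List.length_eq_zero_iff.mp (by simpa using hl.symm))
  obtain ⟨pA, hpA⟩ := Option.isSome_iff_exists.mp (List.getLast?_isSome.mpr hsne)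
  have hpAmem : pA ∈ ps := hperm.mem_iff.mp (List.mem_of_getLast? hpA)
  have hpAmax : ∀ y ∈ ps, pLT pA y = false := by
    intro y hy
    have hy' : y ∈ PySem.List.sorted2 ps Prod.fst Prod.snd := hperm.mem_iff.mpr hy
    rcases pairwise_getLast _ pA hpA (sorted2_pairwise ps) y hy' with rfl | hR
    · exact pLT_irrefl _
    · exact hR
  have heq : pA = m := by
    by_contra hne'
    have hsnd : pA.2 ≠ m.2 := by
      intro h2
      exact hne' (List.inj_on_of_nodup_map hnd hpAmem hmmem h2)
    rcases pLT_total hsnd with h' | h'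
    · exact absurd h' (by simp [hpAmax m hmmem])
    · exact absurd h' (by simp [hmmax pA hpAmem])
  rw [PySem.List.pyGet?_neg_one, hpA, hm, heq]

-- a nested per-sublist fold is the fold over the flattened occurrence list
theorem nested_foldl (f : PySem.Dict String Int → String → PySem.Dict String Int)
    (cs : List (Int × List String)) (d0 : PySem.Dict String Int) :
    cs.foldl (fun d pc => pc.2.foldl f d) d0 = (cs.flatMap (fun pc => pc.2)).foldl f d0 := by
  induction cs generalizing d0 with
  | nil => rfl
  | cons p t ih => rw [List.foldl_cons, List.flatMap_cons, List.foldl_append, ih]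

-- A's try/except counting step is counts[c] = counts.get(c, 0) + 1
theorem aCount_eq : aCount = fun d c => d.insert c (d.getD c 0 + 1) := by
  funext d c
  unfold aCount
  cases h : d.get? c with
  | some v => rw [PySem.Dict.getD_of_get?_eq_some d 0 h]
  | none => rw [PySem.Dict.getD_of_get?_eq_none d 0 h]; norm_num

-- inner boosting loop: keys unchanged, each key n gains c once iff n ∈ ks, n ≠ o, o in n
theorem inner_spec (o : String) (c : Int) :
    ∀ (ks : List String) (d : PySem.Dict String Int), ks.Nodup → (∀ k ∈ ks, k ∈ d.keys) →
      (ks.foldl (aBoostInner o c) d).keys = d.keys ∧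
      ∀ n, (ks.foldl (aBoostInner o c) d).getD n 0 =
        d.getD n 0 + (if n ∈ ks ∧ n ≠ o ∧ PySem.Str.isIn o n then c else 0) := by
  intro ks
  induction ks with
  | nil =>
    intro d _ _
    exact ⟨rfl, fun n => by simp⟩
  | cons k t ih =>
    intro d hnd hsub
    have hk : k ∈ d.keys := hsub k List.mem_cons_self
    have hkeys1 : (aBoostInner o c d k).keys = d.keys := by
      unfold aBoostInner
      split_ifs with h1 h2
      · rfl
      · rw [PySem.Dict.keys_modify,
          PySem.Dict.keys_insert_of_contains _ _ ((PySem.Dict.contains_iff_mem_keys d k).mpr hk)]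
      · rfl
    have hgd1 : ∀ n, (aBoostInner o c d k).getD n 0 =
        d.getD n 0 + (if n = k ∧ k ≠ o ∧ PySem.Str.isIn o k then c else 0) := by
      intro n
      unfold aBoostInner
      by_cases h1 : (k == o) = true
      · rw [if_pos h1, if_neg (by rintro ⟨-, hko, -⟩; exact hko (by simpa using h1))]
        ring
      · rw [if_neg h1]
        by_cases h2 : PySem.Str.isIn o k = true
        · rw [if_pos h2, PySem.Dict.getD_modify]
          by_cases hn : n = k
          · rw [if_pos hn, if_pos ⟨hn, by simpa using h1, h2⟩, hn]
          · rw [if_neg hn, if_neg (by rintro ⟨h', -⟩; exact hn h')]; ring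
        · rw [if_neg h2, if_neg (by rintro ⟨-, -, hin⟩; exact h2 hin)]
          ring
    obtain ⟨hkeys2, hgd2⟩ := ih (aBoostInner o c d k)
      (List.nodup_cons.mp hnd).2
      (fun k' hk' => hkeys1 ▸ hsub k' (List.mem_cons_of_mem _ hk'))
    refine ⟨by rw [List.foldl_cons, hkeys2, hkeys1], fun n => ?_⟩
    rw [List.foldl_cons, hgd2 n, hgd1 n]
    have hknt : k ∉ t := (List.nodup_cons.mp hnd).1
    by_cases hn : n = k
    · subst hn
      rw [if_neg (show ¬ (n ∈ t ∧ n ≠ o ∧ PySem.Str.isIn o n = true) from by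
        rintro ⟨h', -⟩; exact hknt h')]
      by_cases h1 : n ≠ o ∧ PySem.Str.isIn o n = true
      · rw [if_pos (show n = n ∧ n ≠ o ∧ PySem.Str.isIn o n = true from ⟨rfl, h1⟩),
          if_pos (show n ∈ n :: t ∧ n ≠ o ∧ PySem.Str.isIn o n = true from
            ⟨List.mem_cons_self, h1⟩)]
        ring
      · rw [if_neg (show ¬ (n = n ∧ n ≠ o ∧ PySem.Str.isIn o n = true) from by
            rintro ⟨-, h2⟩; exact h1 h2),
          if_neg (show ¬ (n ∈ n :: t ∧ n ≠ o ∧ PySem.Str.isIn o n = true) from by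
            rintro ⟨-, h2⟩; exact h1 h2)]
        ring
    · rw [if_neg (show ¬ (n = k ∧ k ≠ o ∧ PySem.Str.isIn o k = true) from by
        rintro ⟨h', -⟩; exact hn h')]
      by_cases h1 : n ∈ t ∧ n ≠ o ∧ PySem.Str.isIn o n = true
      · rw [if_pos h1,
          if_pos (show n ∈ k :: t ∧ n ≠ o ∧ PySem.Str.isIn o n = true from
            ⟨List.mem_cons_of_mem _ h1.1, h1.2⟩)]
        ring
      · rw [if_neg h1, if_neg (show ¬ (n ∈ k :: t ∧ n ≠ o ∧ PySem.Str.isIn o n = true) from by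
          rintro ⟨hmem, h2⟩
          rcases List.mem_cons.mp hmem with h' | h'
          · exact hn h'
          · exact h1 ⟨h', h2⟩)]
        ring

theorem outer_spec (ps : List (String × Int)) :
    ∀ d : PySem.Dict String Int, d.keys.Nodup →
      (ps.foldl aBoostOuter d).keys = d.keys ∧
      ∀ n, (ps.foldl aBoostOuter d).getD n 0 =
        d.getD n 0 + (ps.map (fun oc =>
          if n ∈ d.keys ∧ n ≠ oc.1 ∧ PySem.Str.isIn oc.1 n then oc.2 else 0)).sum := by
  induction ps with
  | nil =>
    intro d _
    exact ⟨rfl, fun n => by simp⟩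
  | cons oc ps ih =>
    intro d hnd
    obtain ⟨hkeys1, hgd1⟩ := inner_spec oc.1 oc.2 d.keys d hnd (fun k hk => hk)
    obtain ⟨hkeys2, hgd2⟩ := ih (aBoostOuter d oc) (by rw [show (aBoostOuter d oc).keys = d.keys from hkeys1]; exact hnd)
    have hkeq : (aBoostOuter d oc).keys = d.keys := hkeys1
    refine ⟨by rw [List.foldl_cons, hkeys2, hkeq], fun n => ?_⟩
    rw [List.foldl_cons, hgd2 n, hkeq]
    unfold aBoostOuter
    rw [hgd1 n, List.map_cons, List.sum_cons]
    ring

theorem isIn_self (n : String) : PySem.Str.isIn n n = true :=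
  (PySem.Str.isIn_iff_infix n n).mpr (List.infix_refl _)

theorem sum_ite_filter (t : List String) (p : String → Bool) (cnt : String → Int) :
    (t.map (fun o => if p o then cnt o else 0)).sum = ((t.filter p).map cnt).sum := by
  induction t with
  | nil => rfl
  | cons a t ih =>
    by_cases h : p a
    · simp [h, ih]
    · simp [h, ih]

-- A's boosted total for n = sum of cnt over the stored names contained in n
theorem sum_boost (D : List String) (hD : D.Nodup) (n : String) (hn : n ∈ D)
    (cnt : String → Int) :
    cnt n + (D.map (fun o => if n ≠ o ∧ PySem.Str.isIn o n then cnt o else 0)).sum =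
      ((D.filter (fun o => PySem.Str.isIn o n)).map cnt).sum := by
  induction D with
  | nil => simp at hn
  | cons a t ih =>
    rcases List.nodup_cons.mp hD with ⟨hat, hts⟩
    by_cases han : a = n
    · subst han
      have hnt : a ∉ t := hat
      rw [List.filter_cons_of_pos (p := fun o => PySem.Str.isIn o a) (isIn_self a), List.map_cons, List.sum_cons,
        List.map_cons, List.sum_cons, if_neg (by rintro ⟨h', -⟩; exact h' rfl)]
      have : (t.map (fun o => if a ≠ o ∧ PySem.Str.isIn o a then cnt o else 0)).sum =
          ((t.filter (fun o => PySem.Str.isIn o a)).map cnt).sum := by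
        rw [← sum_ite_filter]
        apply congrArg
        apply List.map_congr_left
        intro o ho
        have hoa : a ≠ o := fun h => hnt (h ▸ ho)
        by_cases h2 : PySem.Str.isIn o a
        · rw [if_pos ⟨hoa, h2⟩, if_pos h2]
        · rw [if_neg (by rintro ⟨-, h3⟩; exact h2 h3), if_neg h2]
      rw [this]; ring
    · have hn' : n ∈ t := by
        rcases List.mem_cons.mp hn with h | h
        · exact absurd h.symm han
        · exact h
      rw [List.map_cons, List.sum_cons]
      by_cases h2 : PySem.Str.isIn a n
      · rw [List.filter_cons_of_pos (p := fun o => PySem.Str.isIn o n) h2, List.map_cons, List.sum_cons,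
          if_pos ⟨fun h => han h.symm, h2⟩, ← ih hts hn']
        ring
      · rw [List.filter_cons_of_neg (p := fun o => PySem.Str.isIn o n) (by simpa using h2),
          if_neg (by rintro ⟨-, h3⟩; exact h2 h3), ← ih hts hn']
        ring

-- the substring set B enumerates is exactly {s | s in n}
theorem mem_bPieces (s n : String) : s ∈ bPieces n ↔ PySem.Str.isIn s n = true := by
  unfold bPieces
  rw [PySem.Set.mem_ofList, List.mem_flatMap, PySem.Str.isIn_iff_infix]
  constructor
  · rintro ⟨i, hi, hmem⟩
    rcases List.mem_map.mp hmem with ⟨j, hj, rfl⟩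
    rcases PySem.List.mem_pyRange_one.mp hi with ⟨hi0, -⟩
    rcases PySem.List.mem_pyRange_one.mp hj with ⟨hij, -⟩
    rw [PySem.Str.toList_slice, PySem.Chars.slice_eq_listSlice,
      PySem.List.slice_toNat _ hi0 (le_trans hi0 hij)]
    exact ((n.toList.drop i.toNat).take_prefix _).isInfix.trans (n.toList.drop_suffix i.toNat).isInfix
  · intro h
    obtain ⟨pre, suf, heq⟩ := h
    have hlen : PySem.Str.len n = (n.toList.length : Int) := PySem.Str.len_eq n
    have hlenn : n.toList.length = pre.length + s.toList.length + suf.length := by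
      rw [← heq]; simp; omega
    refine ⟨(pre.length : Int), PySem.List.mem_pyRange_one.mpr ⟨by positivity, by omega⟩,
      List.mem_map.mpr ⟨((pre.length : Int) + (s.toList.length : Int)),
        PySem.List.mem_pyRange_one.mpr ⟨by omega, by omega⟩, ?_⟩⟩
    apply String.toList_inj.mp
    rw [PySem.Str.toList_slice, PySem.Chars.slice_eq_listSlice,
      PySem.List.slice_toNat _ (by positivity) (by positivity)]
    have h1 : ((pre.length : Int) + (s.toList.length : Int)).toNat = pre.length + s.toList.length := by omega
    have h2 : ((pre.length : Int)).toNat = pre.length := by omega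
    rw [h1, h2, ← heq, Nat.add_sub_cancel_left, List.append_assoc, List.drop_left, List.take_left]

-- pieces-sum = filter-sum: dropping zero-count substrings and reindexing by the distinct names
theorem sum_map_filter_zero (l : List String) (p : String → Bool) (f : String → Int)
    (h0 : ∀ x ∈ l, p x = false → f x = 0) :
    (l.map f).sum = ((l.filter p).map f).sum := by
  induction l with
  | nil => rfl
  | cons a t ih =>
    have ht : (t.map f).sum = ((t.filter p).map f).sum :=
      ih (fun x hx => h0 x (List.mem_cons_of_mem _ hx))
    by_cases h : p a
    · simp [List.filter_cons_of_pos h, ht]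
    · have : f a = 0 := h0 a List.mem_cons_self (by simpa using h)
      simp [List.filter_cons_of_neg (by simpa using h), ht, this]

theorem pieces_sum_eq (occ : List String) (n : String) :
    ((bPieces n).map (fun p => (PySem.Dict.counter occ).getD p 0)).sum =
      (((PySem.Set.ofList occ).filter (fun o => PySem.Str.isIn o n)).map
        (fun o => ((occ.count o : Int)))).sum := by
  have hL : ((bPieces n).map (fun p => (PySem.Dict.counter occ).getD p 0)).sum =
      (((bPieces n).filter (fun s => decide (s ∈ occ))).map (fun o => ((occ.count o : Int)))).sum := by
    simp only [PySem.Dict.getD_counter]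
    apply sum_map_filter_zero
    intro x _ hx
    have : x ∉ occ := by simpa using hx
    simp [List.count_eq_zero.mpr this]
  rw [hL]
  apply List.Perm.sum_eq
  apply List.Perm.map
  apply (List.perm_ext_iff_of_nodup
    ((PySem.Set.nodup_ofList _).filter _)
    ((PySem.Set.nodup_ofList _).filter _)).mpr
  intro x
  constructor
  · intro hx
    rcases List.mem_filter.mp hx with ⟨h1, h2⟩
    exact List.mem_filter.mpr ⟨(PySem.Set.mem_ofList occ x).mpr (by simpa using h2),
      (mem_bPieces x n).mp h1⟩
  · intro hx
    rcases List.mem_filter.mp hx with ⟨h1, h2⟩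
    exact List.mem_filter.mpr ⟨(mem_bPieces x n).mpr h2,
      by simpa using (PySem.Set.mem_ofList occ x).mp h1⟩

-- the boosted count of A equals B's substring-set score, for names actually present
theorem boosted_eq_score (occ : List String) (n : String) (hn : n ∈ PySem.Set.ofList occ) :
    ((PySem.Dict.counter occ).items.foldl aBoostOuter (PySem.Dict.counter occ)).getD n 0 =
      bScore (PySem.Dict.counter occ) n := by
  obtain ⟨-, hgd⟩ := outer_spec (PySem.Dict.counter occ).items (PySem.Dict.counter occ)
    (PySem.Dict.nodup_keys_counter occ)
  rw [hgd n, PySem.Dict.getD_counter, PySem.Dict.items_counter, PySem.Dict.keys_counter]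
  unfold bScore
  rw [pieces_sum_eq occ n, List.map_map]
  have hfe3 : ((fun oc : String × Int =>
        if n ∈ PySem.Set.ofList occ ∧ n ≠ oc.1 ∧ PySem.Str.isIn oc.1 n then oc.2 else 0) ∘
      fun k => (k, (List.count k occ : Int))) =
      fun o => if n ≠ o ∧ PySem.Str.isIn o n then (List.count o occ : Int) else 0 := by
    funext o
    show (if n ∈ PySem.Set.ofList occ ∧ n ≠ o ∧ PySem.Str.isIn o n then (List.count o occ : Int) else 0) = _
    by_cases h : n ≠ o ∧ PySem.Str.isIn o n
    · rw [if_pos ⟨hn, h⟩, if_pos h]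
    · rw [if_neg (by rintro ⟨-, h'⟩; exact h h'), if_neg h]
  rw [hfe3]
  exact sum_boost (PySem.Set.ofList occ) (PySem.Set.nodup_ofList occ) n hn
    (fun o => (List.count o occ : Int))

-- ===== VERDICT (by name: the statement is the Claim_ definition above) =====
theorem heuristic_elect_candidate_spec : Claim_equal_heuristic_elect_candidate := by
  intro cands _ hpre
  unfold Spec_heuristic_elect_candidate heuristic_elect_candidate heuristic_elect_candidate_alt
  dsimp only
  rw [nested_foldl aCount, nested_foldl, aCount_eq,
    PySem.Dict.foldl_insert_getD_add_one_eq_counter]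
  have hoccne : cands.flatMap (fun pc => pc.2) ≠ [] := hpre
  generalize hocc : cands.flatMap (fun pc => pc.2) = occ at hoccne ⊢
  obtain ⟨hk, -⟩ := outer_spec (PySem.Dict.counter occ).items (PySem.Dict.counter occ)
    (PySem.Dict.nodup_keys_counter occ)
  have hkD : ((PySem.Dict.counter occ).items.foldl aBoostOuter (PySem.Dict.counter occ)).keys =
      PySem.Set.ofList occ := by rw [hk, PySem.Dict.keys_counter]
  have hn1nodup : ((PySem.Dict.counter occ).items.foldl aBoostOuter (PySem.Dict.counter occ)).keys.Nodup := by
    rw [hkD]; exact PySem.Set.nodup_ofList occ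
  have hitems : (((PySem.Dict.counter occ).items.foldl aBoostOuter (PySem.Dict.counter occ)).items.map
      (fun kv => (kv.2, kv.1))) =
      (PySem.Set.ofList occ).map (fun k => (bScore (PySem.Dict.counter occ) k, k)) := by
    rw [PySem.Dict.items_eq_map_keys _ hn1nodup 0, hkD, List.map_map]
    apply List.map_congr_left
    intro k hkmem
    show (((PySem.Dict.counter occ).items.foldl aBoostOuter (PySem.Dict.counter occ)).getD k 0, k) = _
    rw [boosted_eq_score occ k hkmem]
  rw [hitems]
  have hDne : PySem.Set.ofList occ ≠ [] := by
    intro h0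
    obtain ⟨x, hx⟩ := List.exists_mem_of_ne_nil _ hoccne
    exact absurd (h0 ▸ (PySem.Set.mem_ofList occ x).mpr hx) (List.not_mem_nil)
  have hfoldB : (PySem.Dict.counter occ).keys.foldl (bStep (PySem.Dict.counter occ)) none =
      ((PySem.Set.ofList occ).map (fun k => (bScore (PySem.Dict.counter occ) k, k))).foldl mStep none := by
    rw [PySem.Dict.keys_counter, List.foldl_map]
    have hb : bStep (PySem.Dict.counter occ) =
        fun acc n => mStep acc (bScore (PySem.Dict.counter occ) n, n) := by
      funext acc n
      cases acc with
      | none => rfl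
      | some b => simp [bStep, mStep, pLT]
    rw [hb]
  rw [hfoldB]
  have hpsne : (PySem.Set.ofList occ).map (fun k => (bScore (PySem.Dict.counter occ) k, k)) ≠ [] := by
    simpa using hDne
  have hpsnd : (((PySem.Set.ofList occ).map (fun k => (bScore (PySem.Dict.counter occ) k, k))).map
      Prod.snd).Nodup := by
    rw [List.map_map]
    have : (Prod.snd ∘ fun k : String => (bScore (PySem.Dict.counter occ) k, k)) = id := rfl
    rw [this, List.map_id]
    exact PySem.Set.nodup_ofList occ
  exact select_eq _ hpsne hpsnd
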